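-- pv_equiv track=rewrite | github.com/NNDSrinivas/autonomous-engineering-platform | backend/agent/tools/documentation_tools.py | _clean_empty_sections
-- ===== SOURCE A (Python) =====
-- def _clean_empty_sections(content: str) -> str:
--     """Remove empty sections from generated content."""
--     # Remove sections with only TODO content
--     lines = content.split("\n")
--     result = []
--     skip_until_next_section = False
--
--     for i, line in enumerate(lines):
--         if line.startswith("## "):
--             skip_until_next_section = False
--             # Check if next non-empty line is TODO
--             for j in range(i + 1, min(i + 5, len(lines))):
--                 if lines[j].strip():
--                     if lines[j].strip().startswith("TODO:"):
--                         skip_until_next_section = True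
--                     break
--
--         if not skip_until_next_section:
--             result.append(line)
--
--     return "\n".join(result)
-- ===== SOURCE B (Python) =====
-- def _clean_empty_sections(content: str) -> str:
--     """Remove empty sections from generated content."""
--     # Group lines into a preamble plus one section per '## ' header, then drop
--     # the sections whose first non-empty line (within the 4-line lookahead
--     # window) is a TODO marker, and reassemble the rest.
--     lines = content.split("\n")
--     n = len(lines)
--
--     def first_nonempty_is_todo(i):
--         for j in range(i + 1, min(i + 5, n)):
--             s = lines[j].strip()
--             if s:
--                 return s.startswith("TODO:")
--         return False
--
--     headers = [i for i in range(n) if lines[i].startswith("## ")]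
--     bounds = headers + [n]
--     kept = lines[: bounds[0]] if headers else list(lines)
--     for h, nxt in zip(headers, bounds[1:]):
--         if not first_nonempty_is_todo(h):
--             kept += lines[h:nxt]
--     return "\n".join(kept)
-- ===== Notes on version B (the rewrite author's own statement) =====
-- stated objective: alternative
-- what changed: Replaces A's single pass with a skip-until-next-section flag by a group-then-filter decomposition: first compute the '## ' header indices, then drop every whole section whose first non-empty line in the 4-line lookahead window starts with 'TODO:', and reassemble preamble plus kept sections.
import Mathlib
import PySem

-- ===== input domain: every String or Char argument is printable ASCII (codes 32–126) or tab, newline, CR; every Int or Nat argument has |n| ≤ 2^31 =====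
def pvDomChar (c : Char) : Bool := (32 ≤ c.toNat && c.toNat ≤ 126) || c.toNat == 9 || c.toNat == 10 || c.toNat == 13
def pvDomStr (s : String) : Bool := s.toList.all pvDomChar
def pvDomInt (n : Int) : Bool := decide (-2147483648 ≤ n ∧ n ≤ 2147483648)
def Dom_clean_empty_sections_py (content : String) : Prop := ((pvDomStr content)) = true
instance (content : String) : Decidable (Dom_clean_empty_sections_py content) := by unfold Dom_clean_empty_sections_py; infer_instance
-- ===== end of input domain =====

-- B replaces A's single-pass skip-flag sweep by an explicit group-then-filter decomposition
-- (find the header indices, drop whole TODO sections, reassemble); same cost, alternative structure.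

-- ===== PORT A =====
-- Shared lookahead: the first non-empty line among lines[j], j in the given index list,
-- decides TODO-ness (inlined loop in A, named helper in B; both scan the same window).
-- Indices fed to this helper are always in range, so `(pyGet? …).getD ""` is exact.
def pvLookTodo (lines : List String) : List Int → Bool
  | [] => false
  | j :: js =>
    let s := PySem.Str.strip ((PySem.List.pyGet? lines j).getD "")
    if s ≠ "" then PySem.Str.startswith s "TODO:" else pvLookTodo lines js

def pvIsTodo (lines : List String) (i : Int) : Bool :=
  pvLookTodo lines (PySem.List.pyRange (i + 1) (min (i + 5) (lines.length : Int)) 1)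

def clean_empty_sections_py (content : String) : String :=
  let lines := (PySem.Str.split? content "\n").getD []
  let st := (PySem.List.enumerate lines 0).foldl
    (fun (st : Bool × List String) (p : Int × String) =>
      let skip := if PySem.Str.startswith p.2 "## " then pvIsTodo lines p.1 else st.1
      (skip, if !skip then st.2 ++ [p.2] else st.2))
    (false, ([] : List String))
  PySem.Str.join "\n" st.2

-- ===== PORT B =====
def clean_empty_sections_py_alt (content : String) : String :=
  let lines := (PySem.Str.split? content "\n").getD []
  let n : Int := lines.length
  let headers := (PySem.List.pyRange 0 n 1).filter
    (fun i => PySem.Str.startswith ((PySem.List.pyGet? lines i).getD "") "## ")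
  let bounds := headers ++ [n]
  let kept0 := if headers ≠ [] then PySem.List.slice lines none (some (bounds.headD n)) else lines
  let kept := (headers.zip bounds.tail).foldl
    (fun acc p =>
      if !pvIsTodo lines p.1 then acc ++ PySem.List.slice lines (some p.1) (some p.2) else acc)
    kept0
  PySem.Str.join "\n" kept

-- ===== PRECONDITION & SPEC =====
def Spec_clean_empty_sections_py (content : String) (out : String) : Prop := out = clean_empty_sections_py_alt content
instance (content : String) (out : String) : Decidable (Spec_clean_empty_sections_py content out) := by unfold Spec_clean_empty_sections_py; infer_instance

-- ===== CLAIM (what is proved, stated in full; the proofs are below) =====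
def Claim_equal_clean_empty_sections_py : Prop := ∀ (content : String), Dom_clean_empty_sections_py content → Spec_clean_empty_sections_py content (clean_empty_sections_py content)

-- ===== LEMMAS AND PROOFS =====

-- A's loop rewritten as structural recursion over the enumerated lines.
def pvKrec (lines : List String) : List (Int × String) → Bool → List String
  | [], _ => []
  | p :: r, b =>
    let b' := if PySem.Str.startswith p.2 "## " then pvIsTodo lines p.1 else b
    (if !b' then [p.2] else []) ++ pvKrec lines r b'

-- header predicate over an index
def pvP (lines : List String) (i : Nat) : Bool :=
  PySem.Str.startswith (lines.getD i "") "## "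

-- header indices from position k on
def pvHs (lines : List String) (k : Nat) : List Nat :=
  (List.range' k (lines.length - k)).filter (pvP lines)

def pvG (lines : List String) (p : Nat × Nat) : List String :=
  if !pvIsTodo lines (p.1 : Int) then (lines.drop p.1).take (p.2 - p.1) else []

-- the group-then-filter normal form, parameterised by position and flag
def pvBform (lines : List String) (k : Nat) (b : Bool) : List String :=
  (if b then [] else (lines.drop k).take ((pvHs lines k).headD lines.length - k)) ++
    ((pvHs lines k).zip ((pvHs lines k).tail ++ [lines.length])).flatMap (pvG lines)

theorem pvFoldA (lines : List String) (ps : List (Int × String)) (b : Bool) (acc : List String) :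
    (ps.foldl
      (fun (st : Bool × List String) (p : Int × String) =>
        let skip := if PySem.Str.startswith p.2 "## " then pvIsTodo lines p.1 else st.1
        (skip, if !skip then st.2 ++ [p.2] else st.2))
      (b, acc)).2 = acc ++ pvKrec lines ps b := by
  induction ps generalizing b acc with
  | nil => simp [pvKrec]
  | cons p r ih =>
    simp only [List.foldl_cons]
    rw [ih]
    simp only [pvKrec]
    split <;> split <;> simp

theorem pvHs_ge (lines : List String) (k : Nat) : ∀ h ∈ pvHs lines k, k ≤ h := by
  intro h hh
  have := List.mem_range'_1.mp (List.mem_of_mem_filter hh)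
  omega

theorem pvH0_ge (lines : List String) (k : Nat) (hk : k ≤ lines.length) :
    k ≤ (pvHs lines k).headD lines.length := by
  cases hhs : pvHs lines k with
  | nil => simpa using hk
  | cons h t =>
    have := pvHs_ge lines k h (by rw [hhs]; exact List.mem_cons_self)
    simpa using this

theorem pvMain (lines : List String) (xs : List String) (k : Nat) (b : Bool)
    (hxs : xs = lines.drop k) :
    pvKrec lines (PySem.List.enumerate xs (k : Int)) b = pvBform lines k b := by
  induction xs generalizing k b with
  | nil =>
    have hk : lines.length ≤ k := List.drop_eq_nil_iff.mp hxs.symm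
    have h1 : lines.length - k = 0 := by omega
    simp [pvKrec, pvBform, pvHs, h1, List.drop_eq_nil_iff.mpr hk]
  | cons x xs' ih =>
    have hk : k < lines.length := by
      by_contra hnk
      have : lines.drop k = [] := List.drop_eq_nil_iff.mpr (by omega)
      rw [← hxs] at this; simp at this
    have hx : x = lines.getD k "" := by
      have h0 : (lines.drop k)[0]? = some x := by rw [← hxs]; simp
      rw [List.getElem?_drop] at h0
      simp only [Nat.add_zero] at h0
      simp [List.getD_eq_getElem?_getD, h0]
    have hxs' : xs' = lines.drop (k + 1) := by
      rw [← List.tail_drop, ← hxs]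
      rfl
    subst hx
    have ihk := ih (k + 1) (if pvP lines k then pvIsTodo lines (k : Int) else b) hxs'
    have hrange : List.range' k (lines.length - k) =
        k :: List.range' (k + 1) (lines.length - (k + 1)) := by
      have h2 : lines.length - k = (lines.length - (k + 1)) + 1 := by omega
      rw [h2, List.range'_succ]
    have hup : (k : Int) + 1 = ((k + 1 : Nat) : Int) := by push_cast; ring
    have hg1 : k + 1 ≤ (pvHs lines (k + 1)).headD lines.length := pvH0_ge lines (k + 1) (by omega)
    have hdropc : lines.drop k = lines.getD k "" :: lines.drop (k + 1) := by rw [← hxs', ← hxs]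
    have htake : ∀ m : Nat, k + 1 ≤ m →
        (lines.drop k).take (m - k) = lines.getD k "" :: (lines.drop (k + 1)).take (m - (k + 1)) := by
      intro m hm
      rw [hdropc]
      have : m - k = (m - (k + 1)) + 1 := by omega
      rw [this, List.take_succ_cons]
    simp only [PySem.List.enumerate_cons, pvKrec, hup]
    have hfold : PySem.Str.startswith (List.getD lines k "") "## " = pvP lines k := rfl
    rw [hfold, ihk]
    by_cases hP : pvP lines k
    · have hhs : pvHs lines k = k :: pvHs lines (k + 1) := by
        simp only [pvHs, hrange, List.filter_cons]
        rw [if_pos hP]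
      unfold pvBform
      rw [hhs]
      have hzip : (k :: pvHs lines (k + 1)).zip ((k :: pvHs lines (k + 1)).tail ++ [lines.length]) =
          (k, (pvHs lines (k + 1)).headD lines.length) ::
            (pvHs lines (k + 1)).zip ((pvHs lines (k + 1)).tail ++ [lines.length]) := by
        cases pvHs lines (k + 1) <;> simp
      rw [hzip]
      simp only [hP, if_true, List.flatMap_cons, List.headD_cons, Nat.sub_self, List.take_zero]
      by_cases hT : pvIsTodo lines (k : Int)
      · simp [pvG, hT]
      · simp only [pvG, hT, Bool.not_false, if_true, Bool.false_eq_true, if_false]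
        rw [htake _ hg1]
        simp
    · have hhs : pvHs lines k = pvHs lines (k + 1) := by
        simp [pvHs, hrange, hP]
      unfold pvBform
      rw [hhs]
      simp only [hP, Bool.false_eq_true, if_false]
      cases b with
      | true => simp
      | false =>
        simp only [Bool.not_false, if_true]
        rw [htake _ hg1]
        simp

theorem pvHeadersEq (lines : List String) :
    ((PySem.List.pyRange 0 (lines.length : Int) 1).filter
      (fun i => PySem.Str.startswith ((PySem.List.pyGet? lines i).getD "") "## ")) =
    (pvHs lines 0).map (fun i : Nat => (i : Int)) := by
  have h1 : PySem.List.pyRange 0 (lines.length : Int) 1 =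
      (List.range lines.length).map (fun i : Nat => (i : Int)) := by
    rw [PySem.List.pyRange_one]
    congr 1
    funext k
    rw [zero_add]
  rw [h1, List.filter_map]
  congr 1
  have h2 : ((fun i => PySem.Str.startswith ((PySem.List.pyGet? lines i).getD "") "## ") ∘
      (fun i : Nat => (i : Int))) = pvP lines := by
    funext i
    simp [pvP, PySem.List.pyGet?_natCast, List.getD_eq_getElem?_getD]
  rw [h2]
  unfold pvHs
  rw [Nat.sub_zero, List.range_eq_range']

theorem pvAltEq (content : String) :
    clean_empty_sections_py_alt content =
      PySem.Str.join "\n" (pvBform ((PySem.Str.split? content "\n").getD []) 0 false) := by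
  unfold clean_empty_sections_py_alt
  set lines := (PySem.Str.split? content "\n").getD [] with hl
  simp only [pvHeadersEq]
  congr 1
  have hbody : (fun (acc : List String) (p : Int × Int) =>
      if !pvIsTodo lines p.1 then acc ++ PySem.List.slice lines (some p.1) (some p.2) else acc) =
      (fun acc p => acc ++
        if !pvIsTodo lines p.1 then PySem.List.slice lines (some p.1) (some p.2) else []) := by
    funext acc p
    split <;> simp
  cases hhs : pvHs lines 0 with
  | nil =>
    simp [hhs, pvBform]
  | cons h t =>
    simp only [List.map_cons, List.cons_append, List.headD_cons, List.tail_cons]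
    rw [if_pos (by simp : ((h : Int) :: t.map (fun i : Nat => (i : Int))) ≠ [])]
    rw [hbody, PySem.List.foldl_append_eq_flatMap]
    unfold pvBform
    rw [hhs]
    congr 1
    · rw [PySem.List.slice_to_natCast]
      simp
    · have hmap1 : ((h : Int) :: t.map (fun i : Nat => (i : Int))) =
          (h :: t).map (fun i : Nat => (i : Int)) := by rw [List.map_cons]
      have hmap2 : (t.map (fun i : Nat => (i : Int)) ++ [(lines.length : Int)]) =
          (t ++ [lines.length]).map (fun i : Nat => (i : Int)) := by
        rw [List.map_append, List.map_cons, List.map_nil]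
      rw [hmap1, hmap2, List.zip_map, List.flatMap_map]
      congr 1
      funext p
      simp only [Prod.map, pvG]
      rw [PySem.List.slice_natCast]

theorem clean_empty_sections_py_spec : Claim_equal_clean_empty_sections_py := by
  intro content _
  unfold Spec_clean_empty_sections_py clean_empty_sections_py
  rw [pvAltEq]
  have h := pvFoldA ((PySem.Str.split? content "\n").getD [])
    (PySem.List.enumerate ((PySem.Str.split? content "\n").getD []) 0) false []
  simp only [h, List.nil_append]
  have h0 : (0 : Int) = ((0 : Nat) : Int) := by norm_num
  rw [h0, pvMain _ _ 0 false (by simp)]
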